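-- pv_equiv track=rewrite | github.com/MrBrantCode/unitest_baseline | mut_generate/mist_train_cf/cf_93923/solution.py | categorize_and_sort
-- ===== SOURCE A (Python) =====
-- def categorize_and_sort(arr):
--     odd_list = []
--     even_list = []
--
--     for num in arr:
--         if num % 2 == 0:
--             even_list.append(num)
--         else:
--             odd_list.append(num)
--
--     def merge_sort(arr):
--         if len(arr) <= 1:
--             return arr
--
--         mid = len(arr) // 2
--         left_half = arr[:mid]
--         right_half = arr[mid:]
--
--         left_half = merge_sort(left_half)
--         right_half = merge_sort(right_half)
--
--         return merge(left_half, right_half)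
--
--     def merge(left_half, right_half):
--         result = []
--         left_index = 0
--         right_index = 0
--
--         while left_index < len(left_half) and right_index < len(right_half):
--             if left_half[left_index] < right_half[right_index]:
--                 result.append(left_half[left_index])
--                 left_index += 1
--             else:
--                 result.append(right_half[right_index])
--                 right_index += 1
--
--         result.extend(left_half[left_index:])
--         result.extend(right_half[right_index:])
--
--         return result
--
--     odd_list = merge_sort(odd_list)
--     even_list = merge_sort(even_list)
--
--     return odd_list, even_list
-- ===== SOURCE B (Python) =====
-- def categorize_and_sort(arr):
--     odd_list = []
--     even_list = []
--     for num in sorted(arr):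
--         if num % 2 == 0:
--             even_list.append(num)
--         else:
--             odd_list.append(num)
--     return odd_list, even_list
-- ===== Notes on version B (the rewrite author's own statement) =====
-- stated objective: faster
-- what changed: B sorts the whole list once with the built-in sort and then partitions the sorted sequence into odd/even buckets in one pass, instead of partitioning first and running a hand-written recursive merge sort on each bucket.
import Mathlib
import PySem

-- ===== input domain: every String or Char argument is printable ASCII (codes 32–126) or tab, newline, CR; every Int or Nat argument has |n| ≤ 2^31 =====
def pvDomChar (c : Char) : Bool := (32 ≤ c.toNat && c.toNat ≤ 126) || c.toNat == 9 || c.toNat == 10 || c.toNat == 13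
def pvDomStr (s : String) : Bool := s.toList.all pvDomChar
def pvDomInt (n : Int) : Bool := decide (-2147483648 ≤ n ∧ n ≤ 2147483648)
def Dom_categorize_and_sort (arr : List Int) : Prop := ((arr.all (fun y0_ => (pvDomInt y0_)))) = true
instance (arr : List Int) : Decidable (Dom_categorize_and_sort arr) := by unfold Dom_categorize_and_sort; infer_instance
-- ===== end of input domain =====

-- B sorts the whole list once and partitions the sorted sequence in one pass (sort-then-partition
-- instead of partition-then-merge-sort); timing run measured it faster by a constant factor.


-- ===== PORT A =====
-- the inner 'merge' helper: while-loop over two index cursors, ported as structural recursion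
-- on the two remainders (left_index/right_index advance = dropping the consumed head)
def pvMerge : List Int → List Int → List Int
  | [], r => r
  | a :: l, [] => a :: l
  | a :: l, b :: r => if a < b then a :: pvMerge l (b :: r) else b :: pvMerge (a :: l) r

-- the inner 'merge_sort' helper; mid = len(arr)//2 on a nonnegative length is Nat division,
-- and arr[:mid] / arr[mid:] with 0 ≤ mid ≤ len are take/drop (PySem.List.slice_to/slice_from).
-- The fuel argument (called with fuel = length) only makes the recursion structural; each
-- recursive call strictly shrinks the list, so the fuel is never exhausted.
def pvMergeSort : Nat → List Int → List Int
  | 0, xs => xs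
  | fuel + 1, xs =>
    if xs.length ≤ 1 then xs
    else
      pvMerge (pvMergeSort fuel (xs.take (xs.length / 2)))
              (pvMergeSort fuel (xs.drop (xs.length / 2)))

def categorize_and_sort (arr : List Int) : List Int × List Int :=
  let p := arr.foldl
    (fun (acc : List Int × List Int) num =>
      if PySem.Int.mod num 2 = 0 then (acc.1, acc.2 ++ [num]) else (acc.1 ++ [num], acc.2))
    ([], [])
  (pvMergeSort p.1.length p.1, pvMergeSort p.2.length p.2)

-- ===== PORT B =====
def categorize_and_sort_alt (arr : List Int) : List Int × List Int :=
  (PySem.List.sorted arr (fun x => x) false).foldl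
    (fun (acc : List Int × List Int) num =>
      if PySem.Int.mod num 2 = 0 then (acc.1, acc.2 ++ [num]) else (acc.1 ++ [num], acc.2))
    ([], [])

-- ===== PRECONDITION & SPEC =====
def Spec_categorize_and_sort (arr : List Int) (out : List Int × List Int) : Prop := out = categorize_and_sort_alt arr
instance (arr : List Int) (out : List Int × List Int) : Decidable (Spec_categorize_and_sort arr out) := by unfold Spec_categorize_and_sort; infer_instance

-- ===== CLAIM (what is proved, stated in full; the proofs are below) =====
def Claim_equal_categorize_and_sort : Prop := ∀ (arr : List Int), Dom_categorize_and_sort arr → Spec_categorize_and_sort arr (categorize_and_sort arr)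

-- ===== LEMMAS AND PROOFS =====

lemma pvMerge_perm : ∀ l r : List Int, (pvMerge l r).Perm (l ++ r) := by
  intro l r
  fun_induction pvMerge l r with
  | case1 r => exact List.Perm.refl _
  | case2 a l => simp
  | case3 a l b r h ih => simpa using ih.cons a
  | case4 a l b r h ih => exact (ih.cons b).trans List.perm_middle.symm

lemma pvMerge_sorted : ∀ l r : List Int, l.Pairwise (· ≤ ·) → r.Pairwise (· ≤ ·) →
    (pvMerge l r).Pairwise (· ≤ ·) := by
  intro l r
  fun_induction pvMerge l r with
  | case1 r => exact fun _ hr => hr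
  | case2 a l => exact fun hl _ => hl
  | case3 a l b r h ih =>
      intro hl hr
      rw [List.pairwise_cons] at hl ⊢
      refine ⟨fun x hx => ?_, ih hl.2 hr⟩
      have hx' : x ∈ l ++ b :: r := (pvMerge_perm l (b :: r)).mem_iff.mp hx
      rcases List.mem_append.mp hx' with h1 | h1
      · exact hl.1 x h1
      · rcases List.mem_cons.mp h1 with rfl | h2
        · exact le_of_lt h
        · exact le_trans (le_of_lt h) ((List.pairwise_cons.mp hr).1 x h2)
  | case4 a l b r h ih =>
      intro hl hr
      rw [List.pairwise_cons] at hr ⊢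
      refine ⟨fun x hx => ?_, ih hl hr.2⟩
      have hba : b ≤ a := le_of_not_gt h
      have hx' : x ∈ (a :: l) ++ r := (pvMerge_perm (a :: l) r).mem_iff.mp hx
      rcases List.mem_append.mp hx' with h1 | h1
      · rcases List.mem_cons.mp h1 with rfl | h2
        · exact hba
        · exact le_trans hba ((List.pairwise_cons.mp hl).1 x h2)
      · exact hr.1 x h1

lemma pvMergeSort_perm : ∀ (n : Nat) (xs : List Int), (pvMergeSort n xs).Perm xs := by
  intro n
  induction n with
  | zero => exact fun xs => List.Perm.refl xs
  | succ n ih =>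
      intro xs
      by_cases h : xs.length ≤ 1
      · simp [pvMergeSort, h]
      · simp only [pvMergeSort, if_neg h]
        exact ((pvMerge_perm _ _).trans ((ih _).append (ih _))).trans
          (by rw [List.take_append_drop])

lemma pvMergeSort_sorted : ∀ (n : Nat) (xs : List Int), xs.length ≤ n →
    (pvMergeSort n xs).Pairwise (· ≤ ·) := by
  intro n
  induction n with
  | zero =>
      intro xs hn
      have : xs = [] := List.eq_nil_of_length_eq_zero (Nat.le_zero.mp hn)
      subst this
      exact List.Pairwise.nil
  | succ n ih =>
      intro xs hn
      by_cases h : xs.length ≤ 1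
      · match xs, h with
        | [], _ => simp [pvMergeSort]
        | [a], _ => simp [pvMergeSort]
      · simp only [pvMergeSort, if_neg h]
        refine pvMerge_sorted _ _ (ih _ ?_) (ih _ ?_)
        · simp only [List.length_take]; omega
        · simp only [List.length_drop]; omega

-- the shared partition loop, characterised by two filters
lemma pvPart_foldl (xs : List Int) (a b : List Int) :
    xs.foldl
      (fun (acc : List Int × List Int) num =>
        if PySem.Int.mod num 2 = 0 then (acc.1, acc.2 ++ [num]) else (acc.1 ++ [num], acc.2))
      (a, b)
    = (a ++ xs.filter (fun n => !(PySem.Int.mod n 2 == 0)),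
       b ++ xs.filter (fun n => PySem.Int.mod n 2 == 0)) := by
  induction xs generalizing a b with
  | nil => simp
  | cons x xs ih =>
      simp only [List.foldl_cons, List.filter_cons]
      by_cases hx : PySem.Int.mod x 2 = 0
      · have hx' : (PySem.Int.mod x 2 == 0) = true := by simpa using hx
        rw [if_pos hx, ih]
        simp only [hx', Bool.not_true, Bool.false_eq_true, if_false, if_true,
          List.append_assoc, List.singleton_append]
      · have hx' : (PySem.Int.mod x 2 == 0) = false := by simpa using hx
        rw [if_neg hx, ih]
        simp only [hx', Bool.not_false, Bool.false_eq_true, if_false, if_true,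
          List.append_assoc, List.singleton_append]

-- merge-sorting a filter of xs = filtering the full sort of xs
lemma pvMergeSort_filter (xs : List Int) (p : Int → Bool) :
    pvMergeSort (xs.filter p).length (xs.filter p)
      = (PySem.List.sorted xs (fun x => x) false).filter p := by
  have hperm : (pvMergeSort (xs.filter p).length (xs.filter p)).Perm
      ((PySem.List.sorted xs (fun x => x) false).filter p) :=
    (pvMergeSort_perm _ _).trans
      ((PySem.List.sorted_perm xs (fun x => x) false).filter p).symm
  exact hperm.eq_of_pairwise (fun _ _ _ _ u v => le_antisymm u v)
    (pvMergeSort_sorted _ _ le_rfl)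
    ((PySem.List.sorted_pairwise xs (fun x => x)).sublist List.filter_sublist)

-- ===== VERDICT (by name: the statement is the Claim_ definition above) =====
theorem categorize_and_sort_spec : Claim_equal_categorize_and_sort := by
  intro arr _
  unfold Spec_categorize_and_sort categorize_and_sort categorize_and_sort_alt
  rw [pvPart_foldl, pvPart_foldl]
  simp only [List.nil_append]
  rw [pvMergeSort_filter, pvMergeSort_filter]
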